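-- pv_equiv track=rewrite | github.com/datnnt1997/bert_vn_ner | commons.py | recover_feature
-- ===== SOURCE A (Python) =====
-- def recover_feature(orginal_sentence, feature, feat_type):
--     new_feature = []
--     for words in orginal_sentence:
--         word = words.split("_")
--         if (feat_type + '0') in feature[0:len(word)]:
--             new_feature.append(feat_type + '0')
--         else:
--             new_feature.append(feat_type + '1')
--         del feature[0:len(word)]
--     return new_feature
-- ===== SOURCE B (Python) =====
-- def recover_feature(orginal_sentence, feature, feat_type):
--     # One pass with an advancing index into `feature` instead of A's repeated
--     # front-deletion (A mutates `feature` in place; B leaves it untouched --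
--     # the equivalence claimed is about the return value only).
--     hit = feat_type + '0'
--     miss = feat_type + '1'
--     new_feature = []
--     i = 0
--     for words in orginal_sentence:
--         k = len(words.split('_'))
--         new_feature.append(hit if hit in feature[i:i + k] else miss)
--         i += k
--     return new_feature
-- ===== Notes on version B (the rewrite author's own statement) =====
-- stated objective: alternative
-- what changed: B replaces A's repeated in-place front-deletion of the feature list (del feature[0:k]) by a single advancing index pointer into the untouched list; A mutates its argument, B does not (the return value is identical).
import Mathlib
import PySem

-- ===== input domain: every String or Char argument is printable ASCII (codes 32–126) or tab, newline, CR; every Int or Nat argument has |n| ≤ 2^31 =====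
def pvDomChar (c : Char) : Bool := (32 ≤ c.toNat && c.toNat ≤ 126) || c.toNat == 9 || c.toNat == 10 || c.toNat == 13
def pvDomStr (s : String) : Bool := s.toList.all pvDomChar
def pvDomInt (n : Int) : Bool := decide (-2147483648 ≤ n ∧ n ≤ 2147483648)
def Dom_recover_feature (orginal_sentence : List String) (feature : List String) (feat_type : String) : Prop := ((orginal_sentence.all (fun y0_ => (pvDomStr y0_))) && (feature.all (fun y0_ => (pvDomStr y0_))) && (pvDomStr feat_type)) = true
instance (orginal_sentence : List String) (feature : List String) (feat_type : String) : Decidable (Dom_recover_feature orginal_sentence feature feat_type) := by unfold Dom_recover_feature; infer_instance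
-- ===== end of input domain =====

-- B replaces A's repeated in-place front-deletion of `feature` by an advancing index
-- pointer over the untouched list; A mutates `feature` in place, B does not — the
-- equivalence proved here is about the return value only.


-- ===== PORT A =====
-- loop of A: each iteration tests feature[0:len(word)] and then executes `del feature[0:len(word)]`,
-- i.e. continues with the slice feature[len(word):] as the new list state.
def recover_feature_go (feat_type : String) : List String → List String → List String
  | [], _ => []
  | words :: rest, feature =>
    let word := (PySem.Str.split? words "_").getD []
    (if (feat_type ++ "0") ∈ PySem.List.slice feature (some 0) (some (word.length : Int))
       then feat_type ++ "0" else feat_type ++ "1")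
      :: recover_feature_go feat_type rest (PySem.List.slice feature (some (word.length : Int)) none)

def recover_feature (orginal_sentence : List String) (feature : List String) (feat_type : String) : List String :=
  recover_feature_go feat_type orginal_sentence feature

-- ===== PORT B =====
-- loop body of B: append hit/miss decided on the window feature[i:i+k], advance i by k
def recover_feature_alt_step (feature : List String) (feat_type : String)
    (acc : List String × ℕ) (words : String) : List String × ℕ :=
  let k := ((PySem.Str.split? words "_").getD []).length
  (acc.1 ++ [if (feat_type ++ "0") ∈ PySem.List.slice feature (some (acc.2 : Int)) (some ((acc.2 : Int) + (k : Int)))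
               then feat_type ++ "0" else feat_type ++ "1"],
   acc.2 + k)

def recover_feature_alt (orginal_sentence : List String) (feature : List String) (feat_type : String) : List String :=
  (orginal_sentence.foldl (recover_feature_alt_step feature feat_type)
    (([] : List String), (0 : ℕ))).1

-- ===== PRECONDITION & SPEC =====
def Spec_recover_feature (orginal_sentence : List String) (feature : List String) (feat_type : String) (out : List String) : Prop := out = recover_feature_alt orginal_sentence feature feat_type
instance (orginal_sentence : List String) (feature : List String) (feat_type : String) (out : List String) : Decidable (Spec_recover_feature orginal_sentence feature feat_type out) := by unfold Spec_recover_feature; infer_instance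

-- ===== CLAIM (what is proved, stated in full; the proofs are below) =====
def Claim_equal_recover_feature : Prop := ∀ (orginal_sentence : List String) (feature : List String) (feat_type : String), Dom_recover_feature orginal_sentence feature feat_type → Spec_recover_feature orginal_sentence feature feat_type (recover_feature orginal_sentence feature feat_type)

-- ===== LEMMAS AND PROOFS =====

-- Loop invariant: B's fold with pointer i over the untouched list computes A's
-- recursion applied to the remainder feature.drop i.
lemma recover_feature_fold_eq (feat_type : String) (feature : List String) :
    ∀ (os : List String) (i : ℕ) (out : List String),
    (os.foldl (recover_feature_alt_step feature feat_type) (out, i)).1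
    = out ++ recover_feature_go feat_type os (feature.drop i) := by
  intro os
  induction os with
  | nil => intro i out; simp [recover_feature_go]
  | cons words rest ih =>
    intro i out
    rw [List.foldl_cons, ← Prod.mk.eta (p := recover_feature_alt_step feature feat_type (out, i) words), ih]
    simp [recover_feature_alt_step, recover_feature_go,
      PySem.List.slice_natCast_add, PySem.List.slice_zero_start,
      PySem.List.slice_to_natCast, PySem.List.slice_from_natCast,
      List.drop_drop, List.take_drop, Nat.add_comm]

-- ===== VERDICT (by name: the statement is the Claim_ definition above) =====
theorem recover_feature_spec : Claim_equal_recover_feature := by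
  intro os feature feat_type _
  unfold Spec_recover_feature recover_feature recover_feature_alt
  have h := recover_feature_fold_eq feat_type feature os 0 []
  simp only [List.drop_zero, List.nil_append] at h
  simp only [h]
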